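-- pv_equiv track=rewrite | github.com/cnxw4570123/Problem-Solving | 프로그래머스/3/258709. 주사위 고르기/주사위 고르기.py | calculate
-- ===== SOURCE A (Python) =====
-- def calculate(a, b):
--     a_res = [0, 0, 0]
--     for k1, v1 in a.items():
--         for k2, v2 in b.items():
--             value = v1 * v2
--             if k1 > k2:
--                 a_res[0] += value
--             elif k1 == k2:
--                 a_res[1] += value
--             else:
--                 a_res[2] += value
--     b_res = list(reversed(a_res))
--     return a_res, b_res
-- ===== SOURCE B (Python) =====
-- # Faster exact re-implementation: sort b's items by key once, build prefix sums of
-- # the weights, and answer each a-key with two binary searches instead of a scan of b.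
--
-- def _count_below(keys, x, inclusive):
--     # index of the first key not < x (inclusive=False) / not <= x (inclusive=True)
--     lo, hi = 0, len(keys)
--     while lo < hi:
--         mid = (lo + hi) // 2
--         if keys[mid] < x or (inclusive and keys[mid] == x):
--             lo = mid + 1
--         else:
--             hi = mid
--     return lo
--
-- def _prefix(pairs, s):
--     # prefix sums of the second components, starting at s
--     out = [s]
--     for _, v in pairs:
--         s += v
--         out.append(s)
--     return out
--
-- def calculate(a, b):
--     pairs = sorted(b.items(), key=lambda kv: kv[0])
--     keys = [k for k, _ in pairs]
--     prefix = _prefix(pairs, 0)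
--     total = prefix[len(keys)]
--     gt = eq = lt = 0
--     for k1, v1 in a.items():
--         lo = _count_below(keys, k1, False)
--         hi = _count_below(keys, k1, True)
--         gt += v1 * prefix[lo]
--         eq += v1 * (prefix[hi] - prefix[lo])
--         lt += v1 * (total - prefix[hi])
--     return [gt, eq, lt], [lt, eq, gt]
-- ===== Notes on version B (the rewrite author's own statement) =====
-- stated objective: faster
-- what changed: Instead of A's nested loop over every (a-item, b-item) pair, B sorts b's items by key once, builds prefix sums of the weights, and answers each a-key's less/equal/greater weight totals with two binary searches.
import Mathlib
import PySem

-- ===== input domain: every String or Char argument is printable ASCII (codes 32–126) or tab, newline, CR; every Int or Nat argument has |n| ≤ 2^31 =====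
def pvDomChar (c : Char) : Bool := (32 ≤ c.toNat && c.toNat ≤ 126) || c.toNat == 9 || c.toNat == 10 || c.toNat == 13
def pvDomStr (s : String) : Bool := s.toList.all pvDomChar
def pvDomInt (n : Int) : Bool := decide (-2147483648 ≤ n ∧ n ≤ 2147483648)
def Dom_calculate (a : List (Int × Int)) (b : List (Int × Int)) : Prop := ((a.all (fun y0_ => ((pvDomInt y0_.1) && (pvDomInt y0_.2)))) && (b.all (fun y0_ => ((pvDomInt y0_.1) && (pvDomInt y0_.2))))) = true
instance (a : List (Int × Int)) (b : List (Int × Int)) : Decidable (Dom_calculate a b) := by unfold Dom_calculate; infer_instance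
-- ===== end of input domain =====

-- B replaces A's nested scan of b by sorting b once, prefix sums and two binary searches per a-key.

-- ===== PORT A =====
-- a_res is a 3-element list mutated by index; ported as an (Int × Int × Int) state.
def calculate (a : List (Int × Int)) (b : List (Int × Int)) : List Int × List Int :=
  let r := a.foldl (fun r1 p =>
      b.foldl (fun r2 q =>
        let value := p.2 * q.2
        if p.1 > q.1 then (r2.1 + value, r2.2.1, r2.2.2)
        else if p.1 = q.1 then (r2.1, r2.2.1 + value, r2.2.2)
        else (r2.1, r2.2.1, r2.2.2 + value)) r1)
    ((0 : Int), (0 : Int), (0 : Int))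
  ([r.1, r.2.1, r.2.2], [r.2.2, r.2.1, r.1])

-- ===== PORT B =====
-- _count_below's while loop; keys[mid] is always in range (mid < hi ≤ len), ported with getD.
def countBelow (keys : List Int) (x : Int) (inclusive : Bool) (lo hi : Nat) : Nat :=
  if lo < hi then
    let mid := (lo + hi) / 2
    if keys.getD mid 0 < x ∨ (inclusive = true ∧ keys.getD mid 0 = x) then
      countBelow keys x inclusive (mid + 1) hi
    else
      countBelow keys x inclusive lo mid
  else lo
termination_by hi - lo
decreasing_by all_goals (simp only [mid] at *; omega)

-- _prefix's loop, state (out, s)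
def prefixList (pairs : List (Int × Int)) (s : Int) : List Int :=
  (pairs.foldl (fun (acc : List Int × Int) q => (acc.1 ++ [acc.2 + q.2], acc.2 + q.2)) ([s], s)).1

def calculate_alt (a : List (Int × Int)) (b : List (Int × Int)) : List Int × List Int :=
  let pairs := PySem.List.sorted b (fun kv => kv.1) false
  let keys := pairs.map Prod.fst
  let pre := prefixList pairs 0
  let total := pre.getD keys.length 0
  let r := a.foldl (fun (r : Int × Int × Int) p =>
      let lo := countBelow keys p.1 false 0 keys.length
      let hi := countBelow keys p.1 true 0 keys.length
      (r.1 + p.2 * pre.getD lo 0,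
       r.2.1 + p.2 * (pre.getD hi 0 - pre.getD lo 0),
       r.2.2 + p.2 * (total - pre.getD hi 0)))
    ((0 : Int), (0 : Int), (0 : Int))
  ([r.1, r.2.1, r.2.2], [r.2.2, r.2.1, r.1])

-- ===== PRECONDITION & SPEC =====
def Spec_calculate (a : List (Int × Int)) (b : List (Int × Int)) (out : List Int × List Int) : Prop := out = calculate_alt a b
instance (a : List (Int × Int)) (b : List (Int × Int)) (out : List Int × List Int) : Decidable (Spec_calculate a b out) := by unfold Spec_calculate; infer_instance

-- ===== CLAIM (what is proved, stated in full; the proofs are below) =====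
def Claim_equal_calculate : Prop := ∀ (a : List (Int × Int)) (b : List (Int × Int)), Dom_calculate a b → Spec_calculate a b (calculate a b)

-- ===== LEMMAS AND PROOFS =====

-- weighted sum of the values of l whose key satisfies p
def wsum (l : List (Int × Int)) (p : Int → Bool) : Int :=
  (l.map (fun q => if p q.1 then q.2 else 0)).sum

-- in a sorted list, the elements satisfying a downward-closed predicate are exactly a prefix
lemma getD_lt_countP (keys : List Int) (p : Int → Bool)
    (hs : keys.Pairwise (· ≤ ·)) (hdc : ∀ y z : Int, y ≤ z → p z = true → p y = true) :
    ∀ i, i < keys.length → (p (keys.getD i 0) = true ↔ i < keys.countP p) := by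
  induction keys with
  | nil => intro i h; simp at h
  | cons a t ih =>
    intro i hi
    rw [List.pairwise_cons] at hs
    cases hp : p a
    · have ht : t.countP p = 0 := by
        rw [List.countP_eq_zero]
        intro y hy hpy
        have := hdc a y (hs.1 y hy) hpy
        simp [hp] at this
      have hc : (a :: t).countP p = 0 := by
        rw [List.countP_cons]
        simp [hp, ht]
      rw [hc]
      cases i with
      | zero => simp [hp]
      | succ j =>
        simp only [List.getD_cons_succ]
        constructor
        · intro hpg
          exfalso
          have hj : j < t.length := by simpa using hi
          have hmem : t.getD j 0 ∈ t := by
            rw [List.getD_eq_getElem?_getD, List.getElem?_eq_getElem hj]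
            exact List.mem_of_getElem rfl
          have := List.countP_eq_zero.mp ht _ hmem
          rw [hpg] at this
          simp at this
        · omega
    · have hc : (a :: t).countP p = t.countP p + 1 := by
        rw [List.countP_cons]; simp [hp]
      rw [hc]
      cases i with
      | zero => simp [hp]
      | succ j =>
        simp only [List.getD_cons_succ]
        rw [ih hs.2 j (by simpa using hi)]
        omega

-- the hand-rolled binary search returns the count of keys below x (strict or inclusive)
lemma countBelow_eq (keys : List Int) (x : Int) (inclusive : Bool)
    (hs : keys.Pairwise (· ≤ ·)) :
    ∀ n lo hi, hi - lo ≤ n →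
      lo ≤ keys.countP (fun k => decide (k < x ∨ inclusive = true ∧ k = x)) →
      keys.countP (fun k => decide (k < x ∨ inclusive = true ∧ k = x)) ≤ hi →
      hi ≤ keys.length →
      countBelow keys x inclusive lo hi = keys.countP (fun k => decide (k < x ∨ inclusive = true ∧ k = x)) := by
  have hdc : ∀ y z : Int, y ≤ z → (fun k => decide (k < x ∨ inclusive = true ∧ k = x)) z = true →
      (fun k => decide (k < x ∨ inclusive = true ∧ k = x)) y = true := by
    intro y z hyz hz
    simp only [decide_eq_true_eq] at *
    rcases hz with h | ⟨hinc, h⟩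
    · left; omega
    · rcases lt_or_eq_of_le (hyz.trans_eq h) with h' | h'
      · left; omega
      · right; exact ⟨hinc, h'⟩
  set c := keys.countP (fun k => decide (k < x ∨ inclusive = true ∧ k = x)) with hcdef
  intro n
  induction n with
  | zero =>
    intro lo hi h1 h2 h3 h4
    rw [countBelow]
    have : ¬ lo < hi := by omega
    simp [this]; omega
  | succ m ih =>
    intro lo hi h1 h2 h3 h4
    rw [countBelow]
    by_cases hlh : lo < hi
    · simp only [hlh, if_true]
      have hmid : (lo + hi) / 2 < keys.length := by omega
      have hchar := getD_lt_countP keys _ hs hdc ((lo + hi) / 2) hmid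
      rw [← hcdef] at hchar
      by_cases hcond : keys.getD ((lo + hi) / 2) 0 < x ∨ (inclusive = true ∧ keys.getD ((lo + hi) / 2) 0 = x)
      · simp only [hcond, if_true]
        have : (lo + hi) / 2 < c := by
          apply hchar.mp; simp only [decide_eq_true_eq]; exact hcond
        exact ih ((lo + hi) / 2 + 1) hi (by omega) (by omega) h3 h4
      · simp only [hcond, if_false]
        have : ¬ ((lo + hi) / 2 < c) := by
          intro hlt
          exact hcond (by simpa using hchar.mpr hlt)
        exact ih lo ((lo + hi) / 2) (by omega) h2 (by omega) (by omega)
    · simp [hlh]; omega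

-- on a key-sorted list the weighted sum of a downward-closed predicate is a prefix sum
lemma wsum_eq_take (bs : List (Int × Int)) (p : Int → Bool)
    (hs : bs.Pairwise (fun u w => u.1 ≤ w.1)) (hdc : ∀ y z : Int, y ≤ z → p z = true → p y = true) :
    wsum bs p = ((bs.map Prod.snd).take ((bs.map Prod.fst).countP p)).sum := by
  induction bs with
  | nil => simp [wsum]
  | cons q t ih =>
    rw [List.pairwise_cons] at hs
    cases hp : p q.1
    · have ht : (t.map Prod.fst).countP p = 0 := by
        rw [List.countP_eq_zero]
        intro y hy hpy
        rw [List.mem_map] at hy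
        obtain ⟨w, hw, rfl⟩ := hy
        have := hdc q.1 w.1 (hs.1 w hw) hpy
        simp [hp] at this
      have hsum : ((t.map (fun q => if p q.1 then q.2 else (0:Int))).sum) = 0 := by
        apply List.sum_eq_zero
        intro y hy
        rw [List.mem_map] at hy
        obtain ⟨w, hw, rfl⟩ := hy
        have : p w.1 = false := by
          by_contra hcon
          have := hdc q.1 w.1 (hs.1 w hw) (by simpa using hcon)
          simp [hp] at this
        simp [this]
      simp [wsum, List.countP_cons, hp, ht, hsum]
    · have iht := ih hs.2
      simp only [wsum] at iht ⊢
      simp only [List.map_cons, List.sum_cons, List.countP_cons, hp]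
      rw [iht]
      simp [List.take_succ_cons]

def prefixRec : List (Int × Int) → Int → List Int
  | [], s => [s]
  | q :: t, s => s :: prefixRec t (s + q.2)

lemma prefixAux (pairs : List (Int × Int)) : ∀ (acc : List Int) (s : Int),
    pairs.foldl (fun (acc : List Int × Int) q => (acc.1 ++ [acc.2 + q.2], acc.2 + q.2)) (acc ++ [s], s)
      = ((acc ++ prefixRec pairs s), (prefixRec pairs s).getLast (by cases pairs <;> simp [prefixRec])) := by
  induction pairs with
  | nil => intro acc s; simp [prefixRec]
  | cons q t ih =>
    intro acc s
    simp only [List.foldl_cons, prefixRec]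
    have := ih (acc ++ [s]) (s + q.2)
    rw [this]
    refine Prod.ext (by simp) ?_
    simp only []
    rw [List.getLast_cons (by cases t <;> simp [prefixRec])]

lemma prefixList_eq (pairs : List (Int × Int)) (s : Int) : prefixList pairs s = prefixRec pairs s := by
  have := prefixAux pairs [] s
  simp at this
  simp [prefixList, this]

lemma prefixRec_getD : ∀ (pairs : List (Int × Int)) (s : Int) (i : Nat), i ≤ pairs.length →
    (prefixRec pairs s).getD i 0 = s + ((pairs.map Prod.snd).take i).sum := by
  intro pairs
  induction pairs with
  | nil =>
    intro s i h
    cases Nat.le_zero.mp h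
    simp [prefixRec]
  | cons q t ih =>
    intro s i h
    cases i with
    | zero => simp [prefixRec]
    | succ i =>
      simp only [prefixRec, List.getD_cons_succ, List.map_cons, List.take_succ_cons, List.sum_cons]
      rw [ih (s + q.2) i (by simpa using h)]
      ring

lemma wsum_perm {l l' : List (Int × Int)} (h : l.Perm l') (p : Int → Bool) : wsum l p = wsum l' p := by
  exact (h.map _).sum_eq

lemma wsum_eq_split (l : List (Int × Int)) (x : Int) :
    wsum l (fun k => decide (k = x)) = wsum l (fun k => decide (k ≤ x)) - wsum l (fun k => decide (k < x)) := by
  induction l with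
  | nil => simp [wsum]
  | cons q t ih =>
    simp only [wsum, List.map_cons, List.sum_cons, decide_eq_true_eq] at *
    rcases lt_trichotomy q.1 x with h | h | h
    · simp [ne_of_lt h, le_of_lt h, h]; try rw [ih]; try ring
    · simp [h]; try rw [ih]; try ring
    · simp [ne_of_gt h, not_le.mpr h, not_lt.mpr (le_of_lt h)]; try rw [ih]; try ring

lemma wsum_gt_split (l : List (Int × Int)) (x : Int) :
    wsum l (fun k => decide (x < k)) = (l.map Prod.snd).sum - wsum l (fun k => decide (k ≤ x)) := by
  induction l with
  | nil => simp [wsum]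
  | cons q t ih =>
    simp only [wsum, List.map_cons, List.sum_cons, decide_eq_true_eq] at *
    by_cases h : x < q.1
    · simp [h, not_le.mpr h]; try rw [ih]; try ring
    · simp [h, not_lt.mp h]; try rw [ih]; try ring

-- the inner loop of A adds v1 times the three weighted sums over b
lemma innerA (x v1 : Int) : ∀ (b : List (Int × Int)) (r : Int × Int × Int),
    b.foldl (fun r2 q =>
        let value := v1 * q.2
        if x > q.1 then (r2.1 + value, r2.2.1, r2.2.2)
        else if x = q.1 then (r2.1, r2.2.1 + value, r2.2.2)
        else (r2.1, r2.2.1, r2.2.2 + value)) r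
      = (r.1 + v1 * wsum b (fun k => decide (k < x)),
         r.2.1 + v1 * wsum b (fun k => decide (k = x)),
         r.2.2 + v1 * wsum b (fun k => decide (x < k))) := by
  intro b
  induction b with
  | nil => intro r; simp [wsum]
  | cons q t ih =>
    intro r
    simp only [List.foldl_cons]
    rw [ih]
    simp only [wsum, List.map_cons, List.sum_cons, decide_eq_true_eq]
    rcases lt_trichotomy q.1 x with h | h | h
    · simp [h, ne_of_lt h, not_lt.mpr (le_of_lt h), Prod.ext_iff]
      try (and_intros <;> try ring) <;> try omega
    · simp [h, Prod.ext_iff]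
      try (and_intros <;> try ring) <;> try omega
    · simp [not_lt.mpr (le_of_lt h), ne_of_lt h, h, Prod.ext_iff]
      try (and_intros <;> try ring) <;> try omega

-- B's per-a-element step equals A's inner loop over b
lemma step_eq (b : List (Int × Int)) (x v1 : Int) (r : Int × Int × Int) :
    (r.1 + v1 * (prefixList (PySem.List.sorted b (fun kv => kv.1) false) 0).getD
        (countBelow ((PySem.List.sorted b (fun kv => kv.1) false).map Prod.fst) x false 0
          ((PySem.List.sorted b (fun kv => kv.1) false).map Prod.fst).length) 0,
     r.2.1 + v1 * ((prefixList (PySem.List.sorted b (fun kv => kv.1) false) 0).getD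
        (countBelow ((PySem.List.sorted b (fun kv => kv.1) false).map Prod.fst) x true 0
          ((PySem.List.sorted b (fun kv => kv.1) false).map Prod.fst).length) 0
        - (prefixList (PySem.List.sorted b (fun kv => kv.1) false) 0).getD
        (countBelow ((PySem.List.sorted b (fun kv => kv.1) false).map Prod.fst) x false 0
          ((PySem.List.sorted b (fun kv => kv.1) false).map Prod.fst).length) 0),
     r.2.2 + v1 * ((prefixList (PySem.List.sorted b (fun kv => kv.1) false) 0).getD
        ((PySem.List.sorted b (fun kv => kv.1) false).map Prod.fst).length 0
        - (prefixList (PySem.List.sorted b (fun kv => kv.1) false) 0).getD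
        (countBelow ((PySem.List.sorted b (fun kv => kv.1) false).map Prod.fst) x true 0
          ((PySem.List.sorted b (fun kv => kv.1) false).map Prod.fst).length) 0))
    = (r.1 + v1 * wsum b (fun k => decide (k < x)),
       r.2.1 + v1 * wsum b (fun k => decide (k = x)),
       r.2.2 + v1 * wsum b (fun k => decide (x < k))) := by
  set bs := PySem.List.sorted b (fun kv => kv.1) false with hbs
  have hperm : bs.Perm b := PySem.List.sorted_perm b _ false
  have hpw : bs.Pairwise (fun u w => u.1 ≤ w.1) := PySem.List.sorted_pairwise b _
  have hkeys : (bs.map Prod.fst).Pairwise (· ≤ ·) := List.Pairwise.map _ (fun _ _ h => h) hpw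
  have hdcf : ∀ y z : Int, y ≤ z → (fun k => decide (k < x ∨ false = true ∧ k = x)) z = true →
      (fun k => decide (k < x ∨ false = true ∧ k = x)) y = true := by
    intro y z hyz hz; simp at *; omega
  have hdct : ∀ y z : Int, y ≤ z → (fun k => decide (k < x ∨ true = true ∧ k = x)) z = true →
      (fun k => decide (k < x ∨ true = true ∧ k = x)) y = true := by
    intro y z hyz hz; simp at *; omega
  have hdclt : ∀ y z : Int, y ≤ z → (fun k => decide (k < x)) z = true →
      (fun k => decide (k < x)) y = true := by
    intro y z hyz hz; simp at *; omega
  have hdcle : ∀ y z : Int, y ≤ z → (fun k => decide (k ≤ x)) z = true →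
      (fun k => decide (k ≤ x)) y = true := by
    intro y z hyz hz; simp at *; omega
  have hcf : (bs.map Prod.fst).countP (fun k => decide (k < x ∨ false = true ∧ k = x))
      = (bs.map Prod.fst).countP (fun k => decide (k < x)) := by
    apply List.countP_congr; intro k _; simp
  have hct : (bs.map Prod.fst).countP (fun k => decide (k < x ∨ true = true ∧ k = x))
      = (bs.map Prod.fst).countP (fun k => decide (k ≤ x)) := by
    apply List.countP_congr; intro k _
    simp [le_iff_lt_or_eq]
  have hlo : countBelow (bs.map Prod.fst) x false 0 (bs.map Prod.fst).length
      = (bs.map Prod.fst).countP (fun k => decide (k < x)) := by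
    rw [countBelow_eq (bs.map Prod.fst) x false hkeys (bs.map Prod.fst).length 0 (bs.map Prod.fst).length
      (by omega) (Nat.zero_le _) List.countP_le_length (le_refl _), hcf]
  have hhi : countBelow (bs.map Prod.fst) x true 0 (bs.map Prod.fst).length
      = (bs.map Prod.fst).countP (fun k => decide (k ≤ x)) := by
    rw [countBelow_eq (bs.map Prod.fst) x true hkeys (bs.map Prod.fst).length 0 (bs.map Prod.fst).length
      (by omega) (Nat.zero_le _) List.countP_le_length (le_refl _), hct]
  have hlen : (bs.map Prod.fst).length = bs.length := List.length_map _
  have hgetlo : (prefixList bs 0).getD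
      (countBelow (bs.map Prod.fst) x false 0 (bs.map Prod.fst).length) 0 = wsum b (fun k => decide (k < x)) := by
    rw [hlo, prefixList_eq, prefixRec_getD bs 0 _ (by rw [← hlen]; exact List.countP_le_length)]
    rw [← wsum_eq_take bs _ hpw hdclt, wsum_perm hperm]
    ring
  have hgethi : (prefixList bs 0).getD
      (countBelow (bs.map Prod.fst) x true 0 (bs.map Prod.fst).length) 0 = wsum b (fun k => decide (k ≤ x)) := by
    rw [hhi, prefixList_eq, prefixRec_getD bs 0 _ (by rw [← hlen]; exact List.countP_le_length)]
    rw [← wsum_eq_take bs _ hpw hdcle, wsum_perm hperm]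
    ring
  have hgettot : (prefixList bs 0).getD (bs.map Prod.fst).length 0 = (b.map Prod.snd).sum := by
    rw [hlen, prefixList_eq, prefixRec_getD bs 0 bs.length (le_refl _)]
    rw [List.take_of_length_le (by simp), (hperm.map Prod.snd).sum_eq]
    ring
  rw [hgetlo, hgethi, hgettot, wsum_eq_split b x, wsum_gt_split b x]

-- ===== VERDICT (by name: the statement is the Claim_ definition above) =====
theorem calculate_spec : Claim_equal_calculate := by
  intro a b _
  unfold Spec_calculate calculate calculate_alt
  simp only []
  have hfold : a.foldl (fun r1 p =>
      b.foldl (fun r2 q =>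
        let value := p.2 * q.2
        if p.1 > q.1 then (r2.1 + value, r2.2.1, r2.2.2)
        else if p.1 = q.1 then (r2.1, r2.2.1 + value, r2.2.2)
        else (r2.1, r2.2.1, r2.2.2 + value)) r1)
      (((0 : Int), (0 : Int), (0 : Int)))
    = a.foldl (fun (r : Int × Int × Int) p =>
      let lo := countBelow ((PySem.List.sorted b (fun kv => kv.1) false).map Prod.fst) p.1 false 0
          ((PySem.List.sorted b (fun kv => kv.1) false).map Prod.fst).length
      let hi := countBelow ((PySem.List.sorted b (fun kv => kv.1) false).map Prod.fst) p.1 true 0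
          ((PySem.List.sorted b (fun kv => kv.1) false).map Prod.fst).length
      (r.1 + p.2 * (prefixList (PySem.List.sorted b (fun kv => kv.1) false) 0).getD lo 0,
       r.2.1 + p.2 * ((prefixList (PySem.List.sorted b (fun kv => kv.1) false) 0).getD hi 0
         - (prefixList (PySem.List.sorted b (fun kv => kv.1) false) 0).getD lo 0),
       r.2.2 + p.2 * ((prefixList (PySem.List.sorted b (fun kv => kv.1) false) 0).getD
           ((PySem.List.sorted b (fun kv => kv.1) false).map Prod.fst).length 0
         - (prefixList (PySem.List.sorted b (fun kv => kv.1) false) 0).getD hi 0)))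
      (((0 : Int), (0 : Int), (0 : Int))) := by
    apply List.foldl_ext
    intro r p _
    rw [innerA p.1 p.2 b r]
    exact (step_eq b p.1 p.2 r).symm
  rw [hfold]
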